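-- pv_equiv track=rewrite | github.com/Kiran3100/HOStel-back | build_structure.py | extract_item_name
-- ===== SOURCE A (Python) =====
-- def extract_item_name(text: str) -> str:
--     """
--     Extract the actual item name from cleaned text.
--     Removes inline comments while preserving the item name.
--     """
--     # Split by # to separate name from comments
--     parts = text.split('#')
--
--     if len(parts) > 1:
--         # Take the part before the first #
--         name = parts[0].strip()
--     else:
--         name = text.strip()
--
--     # Remove any invalid filename characters
--     invalid_chars = '<>:"|?*\\'
--     for char in invalid_chars:
--         name = name.replace(char, '_')
--
--     return name
-- ===== SOURCE B (Python) =====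
-- def extract_item_name(text: str) -> str:
--     """Single-pass re-implementation: take the part before the first '#',
--     strip it, and rebuild it in one traversal replacing invalid chars."""
--     name = text.partition('#')[0].strip()
--     invalid = set('<>:"|?*\\')
--     return ''.join('_' if c in invalid else c for c in name)
-- ===== Notes on version B (the rewrite author's own statement) =====
-- stated objective: idiomatic
-- what changed: The 8-pass loop of str.replace calls (one full scan of the name per invalid character) is replaced by a single traversal that tests each character against a set and joins the result; the branchy split is replaced by partition.
import Mathlib
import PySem

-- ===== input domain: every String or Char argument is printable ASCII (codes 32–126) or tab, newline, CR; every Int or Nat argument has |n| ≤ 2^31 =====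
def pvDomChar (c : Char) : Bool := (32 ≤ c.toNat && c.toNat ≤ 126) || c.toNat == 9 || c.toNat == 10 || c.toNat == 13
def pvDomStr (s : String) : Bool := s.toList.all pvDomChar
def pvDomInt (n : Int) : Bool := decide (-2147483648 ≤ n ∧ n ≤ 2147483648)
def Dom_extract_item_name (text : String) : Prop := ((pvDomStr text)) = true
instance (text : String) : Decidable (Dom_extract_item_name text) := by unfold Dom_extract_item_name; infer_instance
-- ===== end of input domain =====

-- B replaces A's 8 sequential str.replace passes by one single-pass rebuild of the
-- name with a membership test (idiomatic single traversal); extraction uses partition.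


-- ===== PORT A =====
-- text.split('#') → PySem.Str.split? (none only for an empty separator, so .getD [] is
-- never taken for "#"); parts[0] → parts.getD 0 "" (Python's split always returns a
-- non-empty list, so parts[0] never raises in the branch where it is read).
def pvPartsA (text : String) : List String := (PySem.Str.split? text "#").getD []
def pvNameA (text : String) : String :=
  if (pvPartsA text).length > 1 then PySem.Str.strip ((pvPartsA text).getD 0 "")
  else PySem.Str.strip text
def extract_item_name (text : String) : String :=
  "<>:\"|?*\\".toList.foldl (fun n c => PySem.Str.replace n (String.ofList [c]) "_") (pvNameA text)

-- ===== PORT B =====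
-- text.partition('#')[0] → the characters before the first '#' (takeWhile);
-- the generator-expression join → a single map over the stripped name.
def extract_item_name_alt (text : String) : String :=
  String.ofList ((PySem.Chars.strip (text.toList.takeWhile (fun c => c ≠ '#'))).map
    (fun c => if c ∈ ['<', '>', ':', '"', '|', '?', '*', '\\'] then '_' else c))

-- ===== PRECONDITION & SPEC =====
def Spec_extract_item_name (text : String) (out : String) : Prop := out = extract_item_name_alt text
instance (text : String) (out : String) : Decidable (Spec_extract_item_name text out) := by unfold Spec_extract_item_name; infer_instance

-- ===== CLAIM (what is proved, stated in full; the proofs are below) =====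
def Claim_equal_extract_item_name : Prop := ∀ (text : String), Dom_extract_item_name text → Spec_extract_item_name text (extract_item_name text)

-- ===== LEMMAS AND PROOFS =====

-- simple one-char splitter used to characterise PySem.Chars.splitOn with a 1-char sep
def pvSplit (h : Char) : List Char → List (List Char)
  | [] => [[]]
  | c :: t =>
    if c = h then [] :: pvSplit h t
    else
      match pvSplit h t with
      | [] => [[c]]
      | x :: r => (c :: x) :: r

theorem pvSplit_ne_nil (h : Char) (cs : List Char) : pvSplit h cs ≠ [] := by
  induction cs with
  | nil => simp [pvSplit]
  | cons c t ih =>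
    simp only [pvSplit]
    split
    · simp
    · cases hp : pvSplit h t <;> simp

theorem splitOn_go_single (h : Char) :
    ∀ (fuel : Nat) (cs cur : List Char) (accs : List (List Char)),
      cs.length ≤ fuel →
      PySem.Chars.splitOn.go [h] fuel cs cur accs =
        accs.reverse ++ (pvSplit h cs).modifyHead (fun x => cur.reverse ++ x) := by
  intro fuel
  induction fuel with
  | zero =>
    intro cs cur accs hle
    have : cs = [] := by
      cases cs with
      | nil => rfl
      | cons a t => simp at hle
    subst this
    simp [PySem.Chars.splitOn.go, pvSplit]
  | succ n ih =>
    intro cs cur accs hle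
    cases cs with
    | nil => simp [PySem.Chars.splitOn.go, pvSplit]
    | cons c t =>
      simp only [PySem.Chars.splitOn.go]
      by_cases hc : c = h
      · subst hc
        have hpre : List.isPrefixOf [c] (c :: t) = true := by
          simp [List.isPrefixOf]
        simp only [hpre, if_pos]
        rw [show List.drop [c].length (c :: t) = t by simp]
        rw [ih t [] (cur.reverse :: accs) (by simpa using Nat.le_of_succ_le_succ hle)]
        simp only [pvSplit, List.reverse_cons,
          List.append_assoc, List.reverse_nil, List.nil_append]
        cases hp : pvSplit c t <;> simp
      · have hpre : List.isPrefixOf [h] (c :: t) = false := by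
          simp [List.isPrefixOf]
          intro hh; exact hc hh.symm
        simp only [hpre]
        rw [if_neg (by simp)]
        rw [ih t (c :: cur) accs (by simpa using Nat.le_of_succ_le_succ hle)]
        simp only [pvSplit, if_neg hc]
        cases hp : pvSplit h t with
        | nil => exact absurd hp (pvSplit_ne_nil h t)
        | cons x r => simp [List.modifyHead]
  
theorem splitOn_single (h : Char) (cs : List Char) :
    PySem.Chars.splitOn cs [h] = pvSplit h cs := by
  unfold PySem.Chars.splitOn
  rw [splitOn_go_single h (cs.length + 1) cs [] [] (by omega)]
  simp only [List.reverse_nil, List.nil_append]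
  cases hp : pvSplit h cs <;> simp [List.modifyHead]

theorem pvSplit_head (h : Char) (cs : List Char) :
    (pvSplit h cs).getD 0 [] = cs.takeWhile (fun c => c ≠ h) := by
  induction cs with
  | nil => simp [pvSplit]
  | cons c t ih =>
    simp only [pvSplit]
    by_cases hc : c = h
    · subst hc; simp [List.takeWhile]
    · rw [if_neg hc]
      cases hp : pvSplit h t with
      | nil => exact absurd hp (pvSplit_ne_nil h t)
      | cons x r =>
        rw [hp] at ih
        simp only [List.getD, List.getElem?_cons_zero, Option.getD_some] at ih ⊢
        rw [List.takeWhile_cons]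
        simp only [hc, decide_not]
        simp only [ne_eq] at ih
        simp [ih]

theorem pvSplit_len (h : Char) (cs : List Char) :
    1 < (pvSplit h cs).length ↔ h ∈ cs := by
  induction cs with
  | nil => simp [pvSplit]
  | cons c t ih =>
    simp only [pvSplit]
    by_cases hc : c = h
    · subst hc
      have := pvSplit_ne_nil c t
      cases hp : pvSplit c t with
      | nil => exact absurd hp this
      | cons x r => simp
    · rw [if_neg hc]
      cases hp : pvSplit h t with
      | nil => exact absurd hp (pvSplit_ne_nil h t)
      | cons x r =>
        rw [hp] at ih
        simp only [List.length_cons, List.mem_cons] at ih ⊢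
        constructor
        · intro hl; right; exact ih.mp hl
        · intro hm
          rcases hm with hm | hm
          · exact absurd hm.symm hc
          · exact ih.mpr hm

theorem replace_go_single (c r : Char) :
    ∀ (fuel : Nat) (cs acc : List Char),
      cs.length ≤ fuel →
      PySem.Chars.replace.go [c] [r] fuel cs acc =
        acc.reverse ++ cs.map (fun x => if x = c then r else x) := by
  intro fuel
  induction fuel with
  | zero =>
    intro cs acc hle
    have : cs = [] := by
      cases cs with
      | nil => rfl
      | cons a t => simp at hle
    subst this
    simp [PySem.Chars.replace.go]
  | succ n ih =>
    intro cs acc hle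
    cases cs with
    | nil => simp [PySem.Chars.replace.go]
    | cons x t =>
      simp only [PySem.Chars.replace.go]
      by_cases hx : x = c
      · subst hx
        have hpre : List.isPrefixOf [x] (x :: t) = true := by simp [List.isPrefixOf]
        simp only [hpre, if_pos]
        rw [show List.drop [x].length (x :: t) = t by simp]
        rw [ih t ([r].reverse ++ acc) (by simpa using Nat.le_of_succ_le_succ hle)]
        simp
      · have hpre : List.isPrefixOf [c] (x :: t) = false := by
          simp [List.isPrefixOf]
          intro hh; exact hx hh.symm
        simp only [hpre]
        rw [if_neg (by simp)]
        rw [ih t (x :: acc) (by simpa using Nat.le_of_succ_le_succ hle)]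
        simp [hx]

theorem replace_single (c r : Char) (cs : List Char) :
    PySem.Chars.replace cs [c] [r] = cs.map (fun x => if x = c then r else x) := by
  unfold PySem.Chars.replace
  rw [if_neg (by simp)]
  rw [replace_go_single c r cs.length cs [] (le_refl _)]
  simp

theorem step_eq (inv : List Char) (c : Char) (hc : c ≠ '_') (cs : List Char) :
    (cs.map (fun x => if x ∈ inv then '_' else x)).map (fun y => if y = c then '_' else y)
    = cs.map (fun x => if x ∈ inv ++ [c] then '_' else x) := by
  induction cs with
  | nil => rfl
  | cons a t ih =>
    simp only [List.map_cons]
    rw [ih]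
    congr 1
    by_cases ha : a ∈ inv
    · simp [ha, Ne.symm hc]
    · by_cases hac : a = c
      · subst hac
        simp [ha]
      · simp [ha, hac]

-- the 8 successive single-char substitution passes collapse to one membership map
theorem fold_maps (cs : List Char) :
    ((((((((cs.map (fun x => if x = '<' then '_' else x)).map
      (fun x => if x = '>' then '_' else x)).map
      (fun x => if x = ':' then '_' else x)).map
      (fun x => if x = '"' then '_' else x)).map
      (fun x => if x = '|' then '_' else x)).map
      (fun x => if x = '?' then '_' else x)).map
      (fun x => if x = '*' then '_' else x)).map
      (fun x => if x = '\\' then '_' else x))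
    = cs.map (fun c => if c ∈ ['<', '>', ':', '"', '|', '?', '*', '\\'] then '_' else c) := by
  rw [show (fun x => if x = '<' then '_' else x)
        = (fun x : Char => if x ∈ (['<'] : List Char) then '_' else x) from
      funext fun x => by simp]
  rw [step_eq _ _ (by decide), step_eq _ _ (by decide), step_eq _ _ (by decide),
      step_eq _ _ (by decide), step_eq _ _ (by decide), step_eq _ _ (by decide),
      step_eq _ _ (by decide)]
  simp

theorem name_eq (text : String) :
    (pvNameA text).toList
    = PySem.Chars.strip (text.toList.takeWhile (fun c => c ≠ '#')) := by
  unfold pvNameA pvPartsA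
  have hsplit : PySem.Str.split? text "#" =
      some ((pvSplit '#' text.toList).map String.ofList) := by
    have h1 := PySem.Str.split?_map text "#"
    have h2 : PySem.Chars.split? text.toList "#".toList =
        some (pvSplit '#' text.toList) := by
      simp [PySem.Chars.split?, show "#".toList = ['#'] from rfl,
        splitOn_single]
    rw [h2] at h1
    cases hs : PySem.Str.split? text "#" with
    | none => simp [hs] at h1
    | some parts =>
      rw [hs] at h1
      simp only [Option.map_some, Option.some.injEq] at h1
      congr 1
      rw [← h1]
      rw [List.map_map]
      have : (String.ofList ∘ String.toList) = id := by
        funext s; simp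
      rw [this, List.map_id]
  rw [hsplit]
  simp only [Option.getD_some]
  by_cases hlen : 1 < ((pvSplit '#' text.toList).map String.ofList).length
  · rw [if_pos hlen]
    rw [PySem.Str.toList_strip]
    congr 1
    have hne := pvSplit_ne_nil '#' text.toList
    have hmem : '#' ∈ text.toList := by
      rw [← pvSplit_len '#' text.toList]
      simpa using hlen
    cases hp : pvSplit '#' text.toList with
    | nil => exact absurd hp hne
    | cons x r =>
      have hhead := pvSplit_head '#' text.toList
      rw [hp] at hhead
      simp only [List.getD, List.getElem?_cons_zero, Option.getD_some] at hhead
      simp [hhead]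
  · rw [if_neg hlen]
    rw [PySem.Str.toList_strip]
    congr 1
    have hnomem : '#' ∉ text.toList := by
      rw [← pvSplit_len '#' text.toList]
      simpa using hlen
    symm
    exact List.takeWhile_eq_self_iff.mpr (fun c hc => by
      simp only [ne_eq, decide_not]
      simp only [Bool.not_eq_true']
      exact decide_eq_false (fun he => hnomem (he ▸ hc)))

-- ===== VERDICT (by name: the statement is the Claim_ definition above) =====
theorem extract_item_name_spec : Claim_equal_extract_item_name := by
  intro text _
  unfold Spec_extract_item_name extract_item_name extract_item_name_alt
  apply String.toList_inj.mp
  rw [String.toList_ofList]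
  simp only [List.foldl_cons, List.foldl_nil]
  simp only [PySem.Str.toList_replace, String.toList_ofList,
    show "_".toList = ['_'] from rfl]
  simp only [replace_single]
  rw [name_eq text]
  exact fold_maps _
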